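-- pv_equiv track=rewrite | github.com/errestan/aoc | 2025/Day 02/day-02-challenge-01.py | is_invalid
-- ===== SOURCE A (Python) =====
-- def is_invalid(start, end):
--     invalid = []
--
--     for id in range(int(start), int(end) + 1):
--         id_str = f"{id}"
--         id_len = len(id_str)
--
--         if id_len % 2 != 0:
--             continue
--
--         half = int(id_len / 2)
--
--         id_one = id_str[:half]
--         id_two = id_str[half:]
--
--         if id_one != id_two:
--             continue
--
--         invalid.append(id)
--
--     return invalid
-- ===== SOURCE B (Python) =====
-- def is_invalid(start, end):
--     invalid = []
--     k = 1
--     while 10 ** (k - 1) * (10 ** k + 1) <= end: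
--         m = 10 ** k + 1
--         lo = max(10 ** (k - 1), -(-start // m))
--         hi = min(10 ** k - 1, end // m)
--         for h in range(lo, hi + 1):
--             invalid.append(h * m)
--         k += 1
--     return invalid
-- ===== Notes on version B (the rewrite author's own statement) =====
-- stated objective: alternative
-- what changed: Instead of scanning every id in [start, end] and string-testing whether its two decimal halves match, B enumerates the valid ids directly: for each half-length k it emits h*(10^k+1) for all k-digit halves h that land in the range.
import Mathlib
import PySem

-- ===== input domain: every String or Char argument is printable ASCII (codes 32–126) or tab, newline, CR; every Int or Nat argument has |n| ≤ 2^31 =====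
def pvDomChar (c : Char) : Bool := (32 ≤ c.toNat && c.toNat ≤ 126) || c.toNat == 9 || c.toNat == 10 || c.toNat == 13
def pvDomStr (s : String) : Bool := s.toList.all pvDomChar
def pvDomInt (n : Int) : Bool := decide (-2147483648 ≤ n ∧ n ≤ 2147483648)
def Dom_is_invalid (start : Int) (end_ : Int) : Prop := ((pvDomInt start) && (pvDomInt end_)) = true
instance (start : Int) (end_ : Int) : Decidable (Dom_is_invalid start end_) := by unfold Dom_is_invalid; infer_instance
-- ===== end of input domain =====

-- B enumerates the valid ids h*(10^k+1) per half-length k directly instead of scanning and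
-- string-testing every id in [start, end]: a different algorithm over the same result.


-- ===== PORT A =====
-- literal port of A; strings handled on the char-list side (PySem.Int.toChars = str(id));
-- `int(id_len / 2)` is ported as floor division, exact here because id_len is a small nonnegative length
def is_invalid (start : Int) (end_ : Int) : List Int :=
  (PySem.List.pyRange start (end_ + 1) 1).foldl (fun invalid id =>
    let id_str := PySem.Int.toChars id
    let id_len : Int := PySem.List.len id_str
    if PySem.Int.mod id_len 2 ≠ 0 then invalid
    else
      let half := PySem.Int.floordiv id_len 2
      let id_one := PySem.List.slice id_str none (some half)
      let id_two := PySem.List.slice id_str (some half) none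
      if id_one ≠ id_two then invalid
      else invalid ++ [id]) []

-- ===== PORT B =====
-- B's while-loop over the half-length k, ported with k = kk + 1; the fuel argument only
-- makes the recursion structural (is_invalid_alt supplies more fuel than the loop can consume)
def isLoop (start : Int) (end_ : Int) : Nat → Nat → List Int
  | _, 0 => []
  | kk, fuel + 1 =>
    let m : Int := 10 ^ (kk + 1) + 1
    if (10 : Int) ^ kk * m ≤ end_ then
      let lo := max ((10 : Int) ^ kk) (-(PySem.Int.floordiv (-start) m))
      let hi := min ((10 : Int) ^ (kk + 1) - 1) (PySem.Int.floordiv end_ m)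
      ((PySem.List.pyRange lo (hi + 1) 1).map (· * m)) ++ isLoop start end_ (kk + 1) fuel
    else []

def is_invalid_alt (start : Int) (end_ : Int) : List Int :=
  isLoop start end_ 0 (end_.toNat + 1)

-- ===== PRECONDITION & SPEC =====
def Spec_is_invalid (start : Int) (end_ : Int) (out : List Int) : Prop := out = is_invalid_alt start end_
instance (start : Int) (end_ : Int) (out : List Int) : Decidable (Spec_is_invalid start end_ out) := by unfold Spec_is_invalid; infer_instance

-- ===== CLAIM (what is proved, stated in full; the proofs are below) =====
def Claim_equal_is_invalid : Prop := ∀ (start : Int) (end_ : Int), Dom_is_invalid start end_ → Spec_is_invalid start end_ (is_invalid start end_)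

-- ===== LEMMAS AND PROOFS =====

def pvPb (id : Int) : Bool :=
  let id_str := PySem.Int.toChars id
  let id_len : Int := PySem.List.len id_str
  if PySem.Int.mod id_len 2 ≠ 0 then false
  else
    let half := PySem.Int.floordiv id_len 2
    decide (PySem.List.slice id_str none (some half) = PySem.List.slice id_str (some half) none)

def pvValid (id : Int) : Prop :=
  ∃ kk h : Nat, 10 ^ kk ≤ h ∧ h < 10 ^ (kk + 1) ∧ id = (h : Int) * (10 ^ (kk + 1) + 1)

lemma pv_toDigitsCore_eq (fuel : Nat) : ∀ (n : Nat) (ds : List Char), 0 < n → n < fuel →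
    Nat.toDigitsCore 10 fuel n ds = ((Nat.digits 10 n).map Nat.digitChar).reverse ++ ds := by
  induction fuel with
  | zero => intro n ds h0 hf; omega
  | succ f ih =>
    intro n ds h0 hf
    rw [Nat.toDigitsCore.eq_def]
    simp only
    by_cases hz : n / 10 = 0
    · have hlt : n < 10 := by omega
      rw [if_pos hz, Nat.digits_of_lt 10 n (by omega) hlt]
      simp [Nat.mod_eq_of_lt hlt]
    · rw [if_neg hz]
      have hrec := ih (n / 10) (Nat.digitChar (n % 10) :: ds) (by omega) (by omega)
      rw [hrec, Nat.digits_def' (by norm_num : (1:Nat) < 10) h0]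
      simp

lemma pv_toChars_pos (n : Nat) (h : 0 < n) :
    PySem.Int.toChars (n : Int) = ((Nat.digits 10 n).map Nat.digitChar).reverse := by
  have : ¬ ((n : Int) < 0) := by omega
  simp only [PySem.Int.toChars, this, if_false, Int.toNat_natCast]
  rw [Nat.toDigits, pv_toDigitsCore_eq (n+1) n [] h (by omega)]
  simp

lemma pv_toChars_neg (id : Int) (h : id < 0) :
    PySem.Int.toChars id = '-' :: ((Nat.digits 10 id.natAbs).map Nat.digitChar).reverse := by
  simp only [PySem.Int.toChars, if_pos h]
  congr 1
  rw [Nat.toDigits, pv_toDigitsCore_eq (id.natAbs + 1) id.natAbs [] (by omega) (by omega)]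
  simp

lemma pv_digits_len_eq (k h : Nat) (h1 : 10 ^ k ≤ h) (h2 : h < 10 ^ (k + 1)) :
    (Nat.digits 10 h).length = k + 1 := by
  have h0 : h ≠ 0 := by
    have : 0 < (10:Nat) ^ k := pow_pos (by norm_num) k
    omega
  have hlog : Nat.log 10 h = k := Nat.log_eq_of_pow_le_of_lt_pow h1 h2
  rw [Nat.length_digits 10 h (by norm_num) h0, hlog]

lemma pv_digits_len_bounds (h k : Nat) (h0 : h ≠ 0) (hl : (Nat.digits 10 h).length = k + 1) :
    10 ^ k ≤ h ∧ h < 10 ^ (k + 1) := by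
  have hlog : Nat.log 10 h = k := by
    have := Nat.length_digits 10 h (by norm_num) h0
    omega
  constructor
  · rw [← hlog]; exact Nat.pow_log_le_self 10 h0
  · rw [← hlog]; exact Nat.lt_pow_succ_log_self (by norm_num) h

lemma pv_digitChar_inj (d1 d2 : Nat) (a1 : d1 < 10) (a2 : d2 < 10)
    (he : Nat.digitChar d1 = Nat.digitChar d2) : d1 = d2 := by
  interval_cases d1 <;> interval_cases d2 <;> simp_all [Nat.digitChar]

lemma pv_digitChar_ne_neg (d : Nat) (hd : d < 10) : Nat.digitChar d ≠ '-' := by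
  interval_cases d <;> simp [Nat.digitChar]

lemma pv_map_digitChar_inj : ∀ (l1 l2 : List Nat), (∀ x ∈ l1, x < 10) → (∀ x ∈ l2, x < 10) →
    l1.map Nat.digitChar = l2.map Nat.digitChar → l1 = l2 := by
  intro l1
  induction l1 with
  | nil => intro l2 _ _ h; cases l2 <;> simp_all
  | cons a t ih =>
    intro l2 h1 h2 h
    cases l2 with
    | nil => simp at h
    | cons b t2 =>
      simp only [List.map_cons, List.cons.injEq] at h
      obtain ⟨hab, ht⟩ := h
      have hd := pv_digitChar_inj a b (h1 a (by simp)) (h2 b (by simp)) hab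
      have := ih t2 (fun x hx => h1 x (by simp [hx])) (fun x hx => h2 x (by simp [hx])) ht
      simp [hd, this]

lemma pv_valid_pos (id : Int) (hv : pvValid id) : 0 < id := by
  obtain ⟨kk, h, h1, h2, rfl⟩ := hv
  have hh : 1 ≤ h := le_trans (Nat.one_le_pow _ _ (by norm_num)) h1
  have hm : (0:Int) < 10 ^ (kk + 1) + 1 := by positivity
  have : (1:Int) ≤ (h : Int) := by exact_mod_cast hh
  nlinarith

lemma pvPb_eval (id : Int) :
    pvPb id = (decide ((PySem.Int.toChars id).length % 2 = 0) &&
      decide ((PySem.Int.toChars id).take ((PySem.Int.toChars id).length / 2) =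
       (PySem.Int.toChars id).drop ((PySem.Int.toChars id).length / 2))) := by
  unfold pvPb
  simp only [PySem.List.len_eq]
  set s := PySem.Int.toChars id with hs
  have hmod : PySem.Int.mod (s.length : Int) 2 = (s.length : Int) % 2 :=
    PySem.Int.mod_eq_emod_of_pos (by norm_num)
  have hdiv : PySem.Int.floordiv (s.length : Int) 2 = (s.length : Int) / 2 :=
    PySem.Int.floordiv_eq_ediv_of_pos (by norm_num)
  have hcast : ((s.length : Int)) / 2 = ((s.length / 2 : Nat) : Int) := by omega
  simp only [hmod, hdiv, hcast,
      PySem.List.slice_to s (show (0:Int) ≤ ((s.length / 2 : Nat) : Int) by omega),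
      PySem.List.slice_from s (show (0:Int) ≤ ((s.length / 2 : Nat) : Int) by omega)]
  simp only [Int.toNat_natCast]
  by_cases hp : (s.length : Int) % 2 = 0
  · have : s.length % 2 = 0 := by omega
    simp [hp, this]
  · have : ¬ (s.length % 2 = 0) := by omega
    simp [hp, this]

lemma pvPb_iff (id : Int) : pvPb id = true ↔ pvValid id := by
  rw [pvPb_eval]
  rcases lt_trichotomy id 0 with hneg | rfl | hpos
  · constructor
    · intro hb
      exfalso
      rw [pv_toChars_neg id hneg] at hb
      set D := ((Nat.digits 10 id.natAbs).map Nat.digitChar).reverse with hD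
      simp only [Bool.and_eq_true, decide_eq_true_eq, List.length_cons] at hb
      obtain ⟨hev, heq⟩ := hb
      set q := (D.length + 1) / 2 with hq
      have hDlen : 1 ≤ D.length := by omega
      have hq1 : 1 ≤ q := by omega
      have hqle : q - 1 < D.length := by omega
      have h1 : (('-' :: D).take q).head? = some '-' := by
        cases hc : q with
        | zero => omega
        | succ m => simp
      have h2 : (('-' :: D).drop q).head? = ('-' :: D)[q]? := List.head?_drop
      have hidx : ('-' :: D)[q]? = D[q - 1]? := by
        cases hc : q with
        | zero => omega
        | succ m => simp
      have hcel : D[q - 1]? = some D[q - 1] := List.getElem?_eq_getElem hqle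
      have hcmem : D[q - 1] ∈ (List.map Nat.digitChar (Nat.digits 10 id.natAbs)).reverse :=
        List.getElem_mem hqle
      rw [List.mem_reverse, List.mem_map] at hcmem
      obtain ⟨d, hd1, hd2⟩ := hcmem
      have hd10 : d < 10 := Nat.digits_lt_base (by norm_num) hd1
      rw [heq, h2, hidx, hcel] at h1
      have : D[q - 1] = '-' := by simpa using h1
      exact pv_digitChar_ne_neg d hd10 (by rw [hd2, this])
    · intro hv
      have := pv_valid_pos id hv
      omega
  · constructor
    · intro hb
      exfalso
      have h0 : PySem.Int.toChars 0 = ['0'] := by decide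
      rw [h0] at hb
      simp at hb
    · intro hv
      have := pv_valid_pos 0 hv
      omega
  · have hn0 : 0 < id.toNat := by omega
    have hid : id = (id.toNat : Int) := (Int.toNat_of_nonneg hpos.le).symm
    rw [hid, pv_toChars_pos id.toNat hn0]
    set n := id.toNat with hn
    set D := Nat.digits 10 n with hDdef
    have hDlt : ∀ x ∈ D, x < 10 := fun x hx => Nat.digits_lt_base (by norm_num) hx
    have hslen : ((D.map Nat.digitChar).reverse).length = D.length := by simp
    have hDne : D ≠ [] := Nat.digits_ne_nil_iff_ne_zero.mpr (by omega)
    constructor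
    · intro hb
      simp only [Bool.and_eq_true, decide_eq_true_eq, hslen] at hb
      obtain ⟨hev, heq⟩ := hb
      set s := (D.map Nat.digitChar).reverse with hsdef
      set q := D.length / 2 with hqdef
      have hDlen : D.length = 2 * q := by omega
      have hq1 : 1 ≤ q := by
        have : D.length ≠ 0 := by simpa using hDne
        omega
      have hslen' : s.length = 2 * q := by rw [hsdef]; simpa using hDlen
      set t := s.take q with htdef
      have hts : s = t ++ t := by
        conv_lhs => rw [← List.take_append_drop q s]
        rw [← heq]
      have htlen : t.length = q := by
        rw [htdef, List.length_take]
        omega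
      have hmap : D.map Nat.digitChar = t.reverse ++ t.reverse := by
        have h3 : s.reverse = (t ++ t).reverse := by rw [← hts]
        rw [hsdef, List.reverse_reverse] at h3
        rw [h3, List.reverse_append]
      have hulen : t.reverse.length = q := by simpa using htlen
      have hmap1 : (D.take q).map Nat.digitChar = t.reverse := by
        rw [List.map_take, hmap]
        exact List.take_left' hulen
      have hmap2 : (D.drop q).map Nat.digitChar = t.reverse := by
        rw [List.map_drop, hmap]
        exact List.drop_left' hulen
      have hD12 : D.take q = D.drop q :=
        pv_map_digitChar_inj _ _ (fun x hx => hDlt x (List.mem_of_mem_take hx))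
          (fun x hx => hDlt x (List.mem_of_mem_drop hx)) (hmap1.trans hmap2.symm)
      set D2 := D.drop q with hD2def
      have hDsplit : D = D2 ++ D2 := by
        conv_lhs => rw [← List.take_append_drop q D]
        rw [hD12]
      have hD2len : D2.length = q := by
        rw [hD2def, List.length_drop]
        omega
      have hD2ne : D2 ≠ [] := by
        intro hcon
        rw [hcon] at hD2len
        simp at hD2len
        omega
      have hlast? : D.getLast? = D2.getLast? := by
        rw [hDsplit]
        exact List.getLast?_append_of_ne_nil _ hD2ne
      have hlastD : D.getLast hDne ≠ 0 := Nat.getLast_digit_ne_zero 10 (by omega)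
      have hlast : D2.getLast hD2ne ≠ 0 := by
        have e1 : D.getLast? = some (D.getLast hDne) := List.getLast?_eq_some_getLast hDne
        have e2 : D2.getLast? = some (D2.getLast hD2ne) := List.getLast?_eq_some_getLast hD2ne
        rw [e1, e2] at hlast?
        rw [← Option.some_inj.mp hlast?]
        exact hlastD
      set h' := Nat.ofDigits 10 D2 with hh'def
      have hdig : Nat.digits 10 h' = D2 :=
        Nat.digits_ofDigits 10 (by norm_num) D2
          (fun x hx => hDlt x (List.mem_of_mem_drop hx)) (fun _ => hlast)
      have happ : Nat.digits 10 h' ++ Nat.digits 10 h' =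
          Nat.digits 10 (h' + 10 ^ (Nat.digits 10 h').length * h') :=
        Nat.digits_append_digits (by norm_num)
      rw [hdig, hD2len] at happ
      have hneq : n = h' + 10 ^ q * h' := by
        apply Nat.digits_inj_iff.mp
        rw [← hDdef, hDsplit, happ]
      have hh'0 : h' ≠ 0 := by
        intro hcon
        rw [hcon] at hdig
        simp at hdig
        exact hD2ne hdig
      obtain ⟨k', hk'⟩ : ∃ k', q = k' + 1 := ⟨q - 1, by omega⟩
      have hb1 := pv_digits_len_bounds h' k' hh'0 (by rw [hdig, hD2len, hk'])
      refine ⟨k', h', hb1.1, hb1.2, ?_⟩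
      rw [← hk', ← hid, hid, hneq]
      push_cast
      ring
    · rintro ⟨kk, h, h1, h2, h3⟩
      have hneq : n = h * (10 ^ (kk + 1) + 1) := by exact_mod_cast h3
      have hdl : (Nat.digits 10 h).length = kk + 1 := pv_digits_len_eq kk h h1 h2
      have happ : Nat.digits 10 h ++ Nat.digits 10 h =
          Nat.digits 10 (h + 10 ^ (kk + 1) * h) := by
        have := Nat.digits_append_digits (b := 10) (n := h) (m := h) (by norm_num)
        rwa [hdl] at this
      have hDsplit : D = Nat.digits 10 h ++ Nat.digits 10 h := by
        rw [hDdef, happ]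
        congr 1
        rw [hneq]; ring
      set w := ((Nat.digits 10 h).map Nat.digitChar).reverse with hwdef
      have hwlen : w.length = kk + 1 := by simp [hwdef, hdl]
      have hsw : (D.map Nat.digitChar).reverse = w ++ w := by
        rw [hDsplit, List.map_append, List.reverse_append]
      have hlen2 : ((D.map Nat.digitChar).reverse).length = 2 * (kk + 1) := by
        rw [hsw]; simp [hwlen]; omega
      simp only [Bool.and_eq_true, decide_eq_true_eq, hslen]
      rw [hsw]
      have hDlen2 : D.length = 2 * (kk + 1) := by
        have := hslen
        omega
      constructor
      · omega
      · have hq : (w ++ w).length / 2 = kk + 1 := by simp [hwlen]; omega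
        have hDl : D.length = (w ++ w).length := by rw [← hsw]; simp
        rw [hDl, hq, List.take_left' hwlen, List.drop_left' hwlen]

lemma pv_A_eq_filter (s e : Int) :
    is_invalid s e = (PySem.List.pyRange s (e + 1) 1).filter pvPb := by
  unfold is_invalid
  have hfun : (fun (invalid : List Int) (id : Int) =>
      let id_str := PySem.Int.toChars id
      let id_len : Int := PySem.List.len id_str
      if PySem.Int.mod id_len 2 ≠ 0 then invalid
      else
        let half := PySem.Int.floordiv id_len 2
        let id_one := PySem.List.slice id_str none (some half)
        let id_two := PySem.List.slice id_str (some half) none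
        if id_one ≠ id_two then invalid
        else invalid ++ [id])
      = (fun (acc : List Int) (x : Int) => if pvPb x then acc ++ [(fun y => y) x] else acc) := by
    funext acc x
    simp only [pvPb]
    split_ifs <;> simp_all
  rw [hfun, PySem.List.foldl_append_if pvPb (fun y => y), List.map_id']
  simp
lemma pv_mem_A (s e id : Int) :
    id ∈ is_invalid s e ↔ (s ≤ id ∧ id ≤ e) ∧ pvPb id = true := by
  rw [pv_A_eq_filter, List.mem_filter, PySem.List.mem_pyRange_one]
  constructor
  · rintro ⟨⟨h1, h2⟩, h3⟩; exact ⟨⟨h1, by omega⟩, h3⟩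
  · rintro ⟨⟨h1, h2⟩, h3⟩; exact ⟨⟨h1, by omega⟩, h3⟩

lemma pv_pairwise_A (s e : Int) : (is_invalid s e).Pairwise (· < ·) := by
  rw [pv_A_eq_filter]
  exact List.Pairwise.sublist List.filter_sublist (PySem.List.pairwise_lt_pyRange_one _ _)

lemma pv_cast_pow (j : Nat) : (((10:Nat) ^ j : Nat) : Int) = (10:Int) ^ j := by push_cast; ring

lemma pv_mem_isLoop (s e : Int) : ∀ (fuel kk : Nat), e < 10 ^ (kk + fuel) →
    ∀ (x : Int), (x ∈ isLoop s e kk fuel ↔ ∃ j h : Nat, kk ≤ j ∧ 10 ^ j ≤ h ∧ h < 10 ^ (j + 1) ∧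
      x = (h : Int) * (10 ^ (j + 1) + 1) ∧ s ≤ x ∧ x ≤ e) := by
  intro fuel
  induction fuel with
  | zero =>
    intro kk hfs x
    simp only [isLoop, List.not_mem_nil, false_iff]
    rintro ⟨j, h, hj, hb1, hb2, hb3, hs, he⟩
    have hcj := pv_cast_pow j
    have hck := pv_cast_pow kk
    have hmono : (10:Nat) ^ kk ≤ 10 ^ j := Nat.pow_le_pow_right (by norm_num) hj
    have hmj : (0:Int) < (10:Int) ^ (j + 1) + 1 := by positivity
    have hxge : (10:Int) ^ j ≤ x := by
      rw [hb3]
      have h5 : (10:Int) ^ j ≤ (h : Int) := by omega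
      nlinarith
    simp only [Nat.add_zero] at hfs
    omega
  | succ fuel ih =>
    intro kk hfs x
    rw [isLoop]
    by_cases hg : (10 : Int) ^ kk * ((10:Int) ^ (kk + 1) + 1) ≤ e
    · rw [if_pos hg]
      have hmpos : (0:Int) < 10 ^ (kk + 1) + 1 := by positivity
      have hc1 := pv_cast_pow kk
      have hc2 := pv_cast_pow (kk + 1)
      have hrec := ih (kk + 1) (by
        have : kk + 1 + fuel = kk + (fuel + 1) := by omega
        rw [this]; exact hfs) x
      simp only [List.mem_append, hrec, List.mem_map, PySem.List.mem_pyRange_one]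
      constructor
      · rintro (⟨hh, ⟨hlo, hhi⟩, rfl⟩ | ⟨j, h, hj, hb1, hb2, hb3, hs, he⟩)
        · rw [max_le_iff] at hlo
          obtain ⟨hge, hceil⟩ := hlo
          have hhi' : hh ≤ min ((10:Int) ^ (kk + 1) - 1) (PySem.Int.floordiv e (10 ^ (kk + 1) + 1)) := by
            omega
          rw [le_min_iff] at hhi'
          obtain ⟨hle, hfd⟩ := hhi'
          have hsx : s ≤ hh * (10 ^ (kk + 1) + 1) := by
            have h9 := (PySem.Int.le_floordiv_iff_mul_le (a := -s) (b := 10 ^ (kk + 1) + 1)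
              (q := -hh) hmpos).mp (by omega)
            nlinarith [h9]
          have hex : hh * (10 ^ (kk + 1) + 1) ≤ e := (PySem.Int.le_floordiv_iff_mul_le hmpos).mp hfd
          have hpos : (0:Int) < hh := lt_of_lt_of_le (pow_pos (by norm_num) _) hge
          have htn : ((hh.toNat : Int)) = hh := Int.toNat_of_nonneg hpos.le
          exact ⟨kk, hh.toNat, le_refl _, by omega, by omega, by rw [htn], hsx, hex⟩
        · exact ⟨j, h, by omega, hb1, hb2, hb3, hs, he⟩
      · rintro ⟨j, h, hj, hb1, hb2, hb3, hs, he⟩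
        rcases eq_or_lt_of_le hj with heq | hj'
        · subst heq
          left
          refine ⟨(h : Int), ⟨?_, ?_⟩, hb3.symm⟩
          · rw [max_le_iff]
            refine ⟨by omega, ?_⟩
            rw [neg_le, PySem.Int.le_floordiv_iff_mul_le hmpos]
            nlinarith [hs, hb3]
          · have hfd : (h : Int) ≤ PySem.Int.floordiv e (10 ^ (kk + 1) + 1) := by
              rw [PySem.Int.le_floordiv_iff_mul_le hmpos]
              rw [← hb3]; exact he
            have h10 : (h : Int) ≤ min ((10:Int) ^ (kk + 1) - 1) (PySem.Int.floordiv e (10 ^ (kk + 1) + 1)) :=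
              le_min_iff.mpr ⟨by omega, hfd⟩
            omega
        · right; exact ⟨j, h, hj', hb1, hb2, hb3, hs, he⟩
    · rw [if_neg hg]
      simp only [List.not_mem_nil, false_iff]
      rintro ⟨j, h, hj, hb1, hb2, hb3, hs, he⟩
      have hc1 := pv_cast_pow kk
      have hc2 := pv_cast_pow (kk + 1)
      have hcj := pv_cast_pow j
      have hcj1 := pv_cast_pow (j + 1)
      have hmono1 : (10:Nat) ^ kk ≤ 10 ^ j := Nat.pow_le_pow_right (by norm_num) hj
      have hmono2 : (10:Nat) ^ (kk + 1) ≤ 10 ^ (j + 1) := Nat.pow_le_pow_right (by norm_num) (by omega)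
      have hx : ((10:Int) ^ j) * ((10:Int) ^ (j + 1) + 1) ≤ x := by
        have hh1 : (10:Int) ^ j ≤ (h : Int) := by omega
        have hmj : (0:Int) < (10:Int) ^ (j + 1) + 1 := by positivity
        rw [hb3]
        apply mul_le_mul_of_nonneg_right hh1 hmj.le
      have hlow : (10:Int) ^ kk * ((10:Int) ^ (kk + 1) + 1) ≤ (10:Int) ^ j * ((10:Int) ^ (j + 1) + 1) := by
        apply mul_le_mul (by omega) (by omega) (by positivity) (by positivity)
      omega

lemma pv_pairwise_isLoop (s e : Int) : ∀ (fuel kk : Nat), e < 10 ^ (kk + fuel) →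
    (isLoop s e kk fuel).Pairwise (· < ·) := by
  intro fuel
  induction fuel with
  | zero => intro kk _; simp only [isLoop]; exact List.Pairwise.nil
  | succ fuel ih =>
    intro kk hfs
    rw [isLoop]
    by_cases hg : (10 : Int) ^ kk * ((10:Int) ^ (kk + 1) + 1) ≤ e
    · rw [if_pos hg]
      have hmpos : (0:Int) < 10 ^ (kk + 1) + 1 := by positivity
      have hfs' : e < 10 ^ (kk + 1 + fuel) := by
        have : kk + 1 + fuel = kk + (fuel + 1) := by omega
        rw [this]; exact hfs
      rw [List.pairwise_append]
      refine ⟨?_, ih (kk + 1) hfs', ?_⟩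
      · rw [List.pairwise_map]
        exact (PySem.List.pairwise_lt_pyRange_one _ _).imp
          (fun hab => mul_lt_mul_of_pos_right hab hmpos)
      · intro x hx y hy
        rw [List.mem_map] at hx
        obtain ⟨hh, hmem, rfl⟩ := hx
        rw [PySem.List.mem_pyRange_one] at hmem
        obtain ⟨hlo, hhi⟩ := hmem
        have hle : hh ≤ (10:Int) ^ (kk + 1) - 1 := by
          have := min_le_left ((10:Int) ^ (kk + 1) - 1) (PySem.Int.floordiv e (10 ^ (kk + 1) + 1))
          omega
        rw [pv_mem_isLoop s e fuel (kk + 1) hfs'] at hy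
        obtain ⟨j, h, hj, hb1, hb2, hb3, _, _⟩ := hy
        have hP1 : (10:Int) ^ (kk + 1) ≤ (10:Int) ^ j :=
          pow_le_pow_right₀ (by norm_num) hj
        have hP2 : (10:Int) ^ (kk + 1) ≤ (10:Int) ^ (j + 1) :=
          pow_le_pow_right₀ (by norm_num) (by omega)
        have hch : ((10:Nat) ^ j : Int) = (10:Int) ^ j := pv_cast_pow j
        have hhge : (10:Int) ^ j ≤ (h : Int) := by omega
        have hlo' : (10:Int) ^ kk ≤ hh := le_trans (le_max_left _ _) hlo
        have hyge : (10:Int) ^ (kk + 1) * ((10:Int) ^ (kk + 1) + 1) ≤ y := by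
          rw [hb3]
          have := mul_le_mul (le_trans hP1 hhge)
            (by omega : (10:Int) ^ (kk + 1) + 1 ≤ (10:Int) ^ (j + 1) + 1)
            (by positivity) (by omega : (0:Int) ≤ (h : Int))
          omega
        nlinarith [hyge, hle, hlo', pow_pos (show (0:Int) < 10 by norm_num) (kk + 1)]
    · rw [if_neg hg]; exact List.Pairwise.nil

lemma pv_fuel_ok (e : Int) : e < 10 ^ (0 + (e.toNat + 1)) := by
  have h1 : e.toNat < 2 ^ e.toNat := Nat.lt_two_pow_self
  have h1b : (2:Nat) ^ e.toNat ≤ 2 ^ (e.toNat + 1) := Nat.pow_le_pow_right (by norm_num) (by omega)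
  have h2 : (2:Nat) ^ (e.toNat + 1) ≤ 10 ^ (e.toNat + 1) :=
    Nat.pow_le_pow_left (by norm_num) _
  have hc := pv_cast_pow (e.toNat + 1)
  simp only [Nat.zero_add]
  omega

-- ===== VERDICT (by name: the statement is the Claim_ definition above) =====
theorem is_invalid_spec : Claim_equal_is_invalid := by
  intro s e _hdom
  unfold Spec_is_invalid is_invalid_alt
  have hfs := pv_fuel_ok e
  have hA := pv_pairwise_A s e
  have hB := pv_pairwise_isLoop s e (e.toNat + 1) 0 hfs
  have hmem : ∀ x, x ∈ is_invalid s e ↔ x ∈ isLoop s e 0 (e.toNat + 1) := by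
    intro x
    rw [pv_mem_A, pv_mem_isLoop s e (e.toNat + 1) 0 hfs, pvPb_iff]
    constructor
    · rintro ⟨⟨hs, he⟩, kk, h, h1, h2, h3⟩
      exact ⟨kk, h, Nat.zero_le _, h1, h2, h3, hs, he⟩
    · rintro ⟨j, h, _, h1, h2, h3, hs, he⟩
      exact ⟨⟨hs, he⟩, j, h, h1, h2, h3⟩
  have hperm : (isLoop s e 0 (e.toNat + 1)).Perm (is_invalid s e) := by
    rw [List.perm_ext_iff_of_nodup (hB.imp ne_of_lt) (hA.imp ne_of_lt)]
    intro a; exact (hmem a).symm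
  have e1 : PySem.List.sorted (is_invalid s e) (fun x => x) = isLoop s e 0 (e.toNat + 1) :=
    PySem.List.sorted_eq_of_perm_of_pairwise_lt _ _ _ hperm hB
  have e2 : PySem.List.sorted (is_invalid s e) (fun x => x) = is_invalid s e :=
    PySem.List.sorted_eq_of_perm_of_pairwise_lt _ _ _ (List.Perm.refl _) hA
  rw [← e1, e2]
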